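-- pv_equiv track=rewrite | github.com/websieu/story_writer_v2 | main.py | _select_conflicts_for_batch
-- ===== SOURCE A (Python) =====
-- from typing import Dict, Any, List, Optional
--
-- def _select_conflicts_for_batch(batch_num: int,
--                                 all_conflicts: List[Dict[str, Any]]) -> List[Dict[str, Any]]:
--     """
--     Select conflicts that should be addressed in this batch.
--
--     Prioritize based on timeline and when they were introduced.
--     """
--     selected = []
--
--     # Always include immediate conflicts
--     immediate = [c for c in all_conflicts if c.get('timeline') == 'immediate']
--     selected.extend(immediate)
--
--     # Include batch-level conflicts
--     batch_conflicts = [c for c in all_conflicts if c.get('timeline') == 'batch']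
--     selected.extend(batch_conflicts)
--
--     # Include some short-term conflicts
--     short_term = [c for c in all_conflicts if c.get('timeline') == 'short_term']
--     selected.extend(short_term[:2])
--
--     # Include awareness of medium/long-term conflicts
--     medium_term = [c for c in all_conflicts if c.get('timeline') in ['medium_term', 'long_term']]
--     selected.extend(medium_term[:2])
--
--     return selected
-- ===== SOURCE B (Python) =====
-- def _select_conflicts_for_batch(batch_num, all_conflicts):
--     # Sort-then-scan: stable-sort the relevant conflicts by a priority rank,
--     # then one capped scan takes everything of ranks 0/1 and at most 2 each
--     # of ranks 2 and 3.  Stability of sort preserves the original order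
--     # inside each rank, and medium_term/long_term share rank 3 so they stay
--     # interleaved as in the input.
--     RANK = {'immediate': 0, 'batch': 1, 'short_term': 2,
--             'medium_term': 3, 'long_term': 3}
--     ranked = sorted((c for c in all_conflicts if c.get('timeline') in RANK),
--                     key=lambda c: RANK[c.get('timeline')])
--     out = []
--     t2 = t3 = 0
--     for c in ranked:
--         r = RANK[c.get('timeline')]
--         if r == 2:
--             if t2 < 2:
--                 out.append(c)
--                 t2 += 1
--         elif r == 3:
--             if t3 < 2:
--                 out.append(c)
--                 t3 += 1
--         else:
--             out.append(c)
--     return out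
-- ===== Notes on version B (the rewrite author's own statement) =====
-- stated objective: alternative
-- what changed: Replaces A's four separate category-filter passes and concatenation by a rank table + stable sort by priority rank followed by a single capped scan (unlimited for ranks 0/1, at most 2 each for ranks 2/3).
import Mathlib
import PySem

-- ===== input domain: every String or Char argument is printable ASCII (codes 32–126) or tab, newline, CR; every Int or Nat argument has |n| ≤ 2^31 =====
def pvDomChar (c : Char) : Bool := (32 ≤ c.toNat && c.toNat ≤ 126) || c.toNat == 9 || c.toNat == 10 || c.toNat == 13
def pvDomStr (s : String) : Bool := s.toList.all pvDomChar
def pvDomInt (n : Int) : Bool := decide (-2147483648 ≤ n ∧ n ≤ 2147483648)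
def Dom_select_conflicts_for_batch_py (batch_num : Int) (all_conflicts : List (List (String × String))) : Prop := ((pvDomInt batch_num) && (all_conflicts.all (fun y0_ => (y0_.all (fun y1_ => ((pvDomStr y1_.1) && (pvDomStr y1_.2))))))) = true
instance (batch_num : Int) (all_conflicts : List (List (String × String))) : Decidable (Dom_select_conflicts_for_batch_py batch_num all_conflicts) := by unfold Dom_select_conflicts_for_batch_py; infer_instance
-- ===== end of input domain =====

-- B replaces A's four category-filter passes and concatenation by a rank table + stable sort by rank + one capped scan (alternative decomposition, same results).

-- ===== PORT A =====
-- c.get('timeline')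
def scbTimeline (c : List (String × String)) : Option String :=
  (PySem.Dict.mk c).get? "timeline"

def select_conflicts_for_batch_py (batch_num : Int) (all_conflicts : List (List (String × String))) : List (List (String × String)) :=
  let selected : List (List (String × String)) := []
  let immediate := all_conflicts.filter (fun c => scbTimeline c == some "immediate")
  let selected := selected ++ immediate
  let batch_conflicts := all_conflicts.filter (fun c => scbTimeline c == some "batch")
  let selected := selected ++ batch_conflicts
  let short_term := all_conflicts.filter (fun c => scbTimeline c == some "short_term")
  let selected := selected ++ PySem.List.slice short_term none (some 2)
  let medium_term := all_conflicts.filter (fun c => [some "medium_term", some "long_term"].contains (scbTimeline c))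
  let selected := selected ++ PySem.List.slice medium_term none (some 2)
  selected

-- ===== PORT B =====
-- the RANK table of Source B
def scbRANK : PySem.Dict String Int :=
  PySem.Dict.mk [("immediate", 0), ("batch", 1), ("short_term", 2), ("medium_term", 3), ("long_term", 3)]

-- RANK.get(c.get('timeline')): some rank iff c.get('timeline') in RANK
def scbRank? (c : List (String × String)) : Option Int :=
  (scbTimeline c).bind (fun t => scbRANK.get? t)

-- RANK[c.get('timeline')], the sort key; only evaluated on ranked conflicts, where the lookup succeeds
def scbKey (c : List (String × String)) : Int :=
  (scbRank? c).getD 0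

-- one iteration of Source B's capped scan; state = (out, t2, t3)
def scbScanStep (st : List (List (String × String)) × Int × Int) (c : List (String × String)) :
    List (List (String × String)) × Int × Int :=
  let (out, t2, t3) := st
  let r := scbKey c
  if r == 2 then
    if t2 < 2 then (out ++ [c], t2 + 1, t3) else (out, t2, t3)
  else if r == 3 then
    if t3 < 2 then (out ++ [c], t2, t3 + 1) else (out, t2, t3)
  else (out ++ [c], t2, t3)

def select_conflicts_for_batch_py_alt (batch_num : Int) (all_conflicts : List (List (String × String))) : List (List (String × String)) :=
  let ranked := PySem.List.sorted (all_conflicts.filter (fun c => (scbRank? c).isSome)) scbKey false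
  (ranked.foldl scbScanStep ([], 0, 0)).1

-- ===== PRECONDITION & SPEC =====
def Spec_select_conflicts_for_batch_py (batch_num : Int) (all_conflicts : List (List (String × String))) (out : List (List (String × String))) : Prop := out = select_conflicts_for_batch_py_alt batch_num all_conflicts
instance (batch_num : Int) (all_conflicts : List (List (String × String))) (out : List (List (String × String))) : Decidable (Spec_select_conflicts_for_batch_py batch_num all_conflicts out) := by unfold Spec_select_conflicts_for_batch_py; infer_instance

-- ===== CLAIM (what is proved, stated in full; the proofs are below) =====
def Claim_equal_select_conflicts_for_batch_py : Prop := ∀ (batch_num : Int) (all_conflicts : List (List (String × String))), Dom_select_conflicts_for_batch_py batch_num all_conflicts → Spec_select_conflicts_for_batch_py batch_num all_conflicts (select_conflicts_for_batch_py batch_num all_conflicts)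

-- ===== LEMMAS AND PROOFS =====

-- the rank lookup, characterised by the timeline string
theorem scb_rankOf_eq (t : String) (i : Int) :
    scbRANK.get? t = some i ↔
      ((i = 0 ∧ t = "immediate") ∨ (i = 1 ∧ t = "batch") ∨ (i = 2 ∧ t = "short_term") ∨
       (i = 3 ∧ (t = "medium_term" ∨ t = "long_term"))) := by
  by_cases h1 : "immediate" = t
  · subst h1; simp [scbRANK, PySem.Dict.get?]; omega
  by_cases h2 : "batch" = t
  · subst h2; simp [scbRANK, PySem.Dict.get?]; omega
  by_cases h3 : "short_term" = t
  · subst h3; simp [scbRANK, PySem.Dict.get?]; omega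
  by_cases h4 : "medium_term" = t
  · subst h4; simp [scbRANK, PySem.Dict.get?]; omega
  by_cases h5 : "long_term" = t
  · subst h5; simp [scbRANK, PySem.Dict.get?]; omega
  · simp [scbRANK, PySem.Dict.get?, List.find?, beq_eq_false_iff_ne.mpr h1, beq_eq_false_iff_ne.mpr h2,
      beq_eq_false_iff_ne.mpr h3, beq_eq_false_iff_ne.mpr h4, beq_eq_false_iff_ne.mpr h5,
      Ne.symm h1, Ne.symm h2, Ne.symm h3, Ne.symm h4, Ne.symm h5]

theorem scb_rank?_eq (c : List (String × String)) (i : Int) :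
    scbRank? c = some i ↔
      ((i = 0 ∧ scbTimeline c = some "immediate") ∨ (i = 1 ∧ scbTimeline c = some "batch") ∨
       (i = 2 ∧ scbTimeline c = some "short_term") ∨
       (i = 3 ∧ (scbTimeline c = some "medium_term" ∨ scbTimeline c = some "long_term"))) := by
  cases h : scbTimeline c with
  | none => simp [scbRank?, h]
  | some t => simp [scbRank?, h, scb_rankOf_eq]

theorem scb_rank?_isSome (c : List (String × String)) :
    ((scbRank? c).isSome = true) ↔ ∃ i, scbRank? c = some i ∧ (i = 0 ∨ i = 1 ∨ i = 2 ∨ i = 3) := by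
  constructor
  · intro h
    obtain ⟨i, hi⟩ := Option.isSome_iff_exists.mp h
    refine ⟨i, hi, ?_⟩
    rcases (scb_rank?_eq c i).mp hi with ⟨h, _⟩ | ⟨h, _⟩ | ⟨h, _⟩ | ⟨h, _⟩ <;> omega
  · rintro ⟨i, hi, _⟩; simp [hi]

theorem scb_key_of_rank (c : List (String × String)) (i : Int) (h : scbRank? c = some i) :
    scbKey c = i := by simp [scbKey, h]

-- inserting skips a prefix it is not 'before'
theorem scb_insertBy_append {α : Type} (bf : α → α → Bool) (x : α) (A B : List α)
    (h : ∀ a ∈ A, bf x a = false) :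
    PySem.List.insertBy bf x (A ++ B) = A ++ PySem.List.insertBy bf x B := by
  induction A with
  | nil => simp
  | cons a A ih =>
    have ha := h a (by simp)
    simp only [List.cons_append, PySem.List.insertBy, ha]
    simp only [Bool.false_eq_true, if_false]
    rw [ih (fun a ha' => h a (by simp [ha']))]

-- inserting in front of a list it is entirely 'before'
theorem scb_insertBy_front {α : Type} (bf : α → α → Bool) (x : α) (B : List α)
    (h : ∀ b ∈ B, bf x b = true) :
    PySem.List.insertBy bf x B = x :: B := by
  cases B with
  | nil => simp [PySem.List.insertBy]
  | cons b B => simp [PySem.List.insertBy, h b (by simp)]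

-- the filter of conflicts of rank i
def scbF (i : Int) (xs : List (List (String × String))) : List (List (String × String)) :=
  xs.filter (fun c => scbRank? c == some i)

-- the insertion sort of Source B, run over ranked conflicts on top of a rank-partitioned accumulator,
-- extends each rank segment in order: stability made explicit
theorem scb_sort_invariant (xs : List (List (String × String)))
    (hxs : ∀ c ∈ xs, ∃ i, scbRank? c = some i ∧ (i = 0 ∨ i = 1 ∨ i = 2 ∨ i = 3))
    (A0 A1 A2 A3 : List (List (String × String)))
    (h0 : ∀ a ∈ A0, scbRank? a = some 0) (h1 : ∀ a ∈ A1, scbRank? a = some 1)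
    (h2 : ∀ a ∈ A2, scbRank? a = some 2) (h3 : ∀ a ∈ A3, scbRank? a = some 3) :
    xs.foldl (fun acc x => PySem.List.insertBy (fun a b => decide (scbKey a < scbKey b)) x acc)
        (A0 ++ A1 ++ A2 ++ A3) =
      (A0 ++ scbF 0 xs) ++ (A1 ++ scbF 1 xs) ++ (A2 ++ scbF 2 xs) ++ (A3 ++ scbF 3 xs) := by
  induction xs generalizing A0 A1 A2 A3 with
  | nil => simp [scbF]
  | cons c rest ih =>
    obtain ⟨i, hi, hcase⟩ := hxs c (by simp)
    have hkc := scb_key_of_rank c i hi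
    have hrest : ∀ c ∈ rest, ∃ i, scbRank? c = some i ∧ (i = 0 ∨ i = 1 ∨ i = 2 ∨ i = 3) :=
      fun c hc => hxs c (by simp [hc])
    simp only [List.foldl_cons]
    rcases hcase with h | h | h | h <;> subst h
    · -- rank 0: insert at the end of segment 0
      rw [show A0 ++ A1 ++ A2 ++ A3 = A0 ++ (A1 ++ A2 ++ A3) by simp,
        scb_insertBy_append _ _ _ _ (by
          intro a ha; have := scb_key_of_rank a 0 (h0 a ha); simp [hkc, this]),
        scb_insertBy_front _ _ _ (by
          intro b hb; simp only [List.mem_append] at hb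
          rcases hb with (hb | hb) | hb
          · have := scb_key_of_rank b 1 (h1 b hb); simp [hkc, this]
          · have := scb_key_of_rank b 2 (h2 b hb); simp [hkc, this]
          · have := scb_key_of_rank b 3 (h3 b hb); simp [hkc, this])]
      rw [show A0 ++ (c :: (A1 ++ A2 ++ A3)) = (A0 ++ [c]) ++ A1 ++ A2 ++ A3 by simp]
      rw [ih hrest (A0 ++ [c]) A1 A2 A3
        (by intro a ha; rcases List.mem_append.mp ha with ha | ha
            · exact h0 a ha
            · simp at ha; subst ha; exact hi) h1 h2 h3]
      simp [scbF, hi]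
    · -- rank 1
      rw [show A0 ++ A1 ++ A2 ++ A3 = (A0 ++ A1) ++ (A2 ++ A3) by simp,
        scb_insertBy_append _ _ _ _ (by
          intro a ha; simp only [List.mem_append] at ha
          rcases ha with ha | ha
          · have := scb_key_of_rank a 0 (h0 a ha); simp [hkc, this]
          · have := scb_key_of_rank a 1 (h1 a ha); simp [hkc, this]),
        scb_insertBy_front _ _ _ (by
          intro b hb; simp only [List.mem_append] at hb
          rcases hb with hb | hb
          · have := scb_key_of_rank b 2 (h2 b hb); simp [hkc, this]
          · have := scb_key_of_rank b 3 (h3 b hb); simp [hkc, this])]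
      rw [show (A0 ++ A1) ++ (c :: (A2 ++ A3)) = A0 ++ (A1 ++ [c]) ++ A2 ++ A3 by simp]
      rw [ih hrest A0 (A1 ++ [c]) A2 A3 h0
        (by intro a ha; rcases List.mem_append.mp ha with ha | ha
            · exact h1 a ha
            · simp at ha; subst ha; exact hi) h2 h3]
      simp [scbF, hi]
    · -- rank 2
      rw [show A0 ++ A1 ++ A2 ++ A3 = (A0 ++ A1 ++ A2) ++ A3 by simp,
        scb_insertBy_append _ _ _ _ (by
          intro a ha; simp only [List.mem_append] at ha
          rcases ha with (ha | ha) | ha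
          · have := scb_key_of_rank a 0 (h0 a ha); simp [hkc, this]
          · have := scb_key_of_rank a 1 (h1 a ha); simp [hkc, this]
          · have := scb_key_of_rank a 2 (h2 a ha); simp [hkc, this]),
        scb_insertBy_front _ _ _ (by
          intro b hb; have := scb_key_of_rank b 3 (h3 b hb); simp [hkc, this])]
      rw [show (A0 ++ A1 ++ A2) ++ (c :: A3) = A0 ++ A1 ++ (A2 ++ [c]) ++ A3 by simp]
      rw [ih hrest A0 A1 (A2 ++ [c]) A3 h0 h1
        (by intro a ha; rcases List.mem_append.mp ha with ha | ha
            · exact h2 a ha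
            · simp at ha; subst ha; exact hi) h3]
      simp [scbF, hi]
    · -- rank 3: nothing is after it
      rw [PySem.List.insertBy_of_forall_not_before _ _ _ (by
          intro a ha; simp only [List.mem_append] at ha
          rcases ha with ((ha | ha) | ha) | ha
          · have := scb_key_of_rank a 0 (h0 a ha); simp [hkc, this]
          · have := scb_key_of_rank a 1 (h1 a ha); simp [hkc, this]
          · have := scb_key_of_rank a 2 (h2 a ha); simp [hkc, this]
          · have := scb_key_of_rank a 3 (h3 a ha); simp [hkc, this])]
      rw [show (A0 ++ A1 ++ A2 ++ A3) ++ [c] = A0 ++ A1 ++ A2 ++ (A3 ++ [c]) by simp]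
      rw [ih hrest A0 A1 A2 (A3 ++ [c]) h0 h1 h2
        (by intro a ha; rcases List.mem_append.mp ha with ha | ha
            · exact h3 a ha
            · simp at ha; subst ha; exact hi)]
      simp [scbF, hi]

-- the capped scan over a segment of uncapped rank (0 or 1) appends everything
theorem scb_scan_free (zs : List (List (String × String)))
    (h : ∀ c ∈ zs, scbKey c ≠ 2 ∧ scbKey c ≠ 3)
    (out : List (List (String × String))) (t2 t3 : Int) :
    zs.foldl scbScanStep (out, t2, t3) = (out ++ zs, t2, t3) := by
  induction zs generalizing out with
  | nil => simp
  | cons c rest ih =>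
    obtain ⟨hc2, hc3⟩ := h c (by simp)
    simp only [List.foldl_cons, scbScanStep, beq_iff_eq, hc2, hc3, if_false]
    rw [ih (fun c hc => h c (by simp [hc]))]
    simp

-- the capped scan over a rank-2 segment appends its first (2 - t2) elements
theorem scb_scan_cap2 (zs : List (List (String × String)))
    (h : ∀ c ∈ zs, scbKey c = 2)
    (out : List (List (String × String))) (t2 t3 : Int) (ht : 0 ≤ t2) :
    ∃ u, zs.foldl scbScanStep (out, t2, t3) = (out ++ zs.take (2 - t2).toNat, u, t3) := by
  induction zs generalizing out t2 with
  | nil => exact ⟨t2, by simp⟩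
  | cons c rest ih =>
    have hc := h c (by simp)
    have hrest : ∀ c ∈ rest, scbKey c = 2 := fun c hc => h c (by simp [hc])
    by_cases hlt : t2 < 2
    · simp only [List.foldl_cons, scbScanStep, hc, beq_self_eq_true, if_true, if_pos hlt]
      obtain ⟨u, hu⟩ := ih hrest (out ++ [c]) (t2 + 1) (by omega)
      refine ⟨u, ?_⟩
      rw [hu, show (2 - t2).toNat = (2 - (t2 + 1)).toNat + 1 by omega, List.take_succ_cons]
      simp
    · simp only [List.foldl_cons, scbScanStep, hc, beq_self_eq_true, if_true, if_neg hlt]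
      obtain ⟨u, hu⟩ := ih hrest out t2 ht
      refine ⟨u, ?_⟩
      rw [hu, show (2 - t2).toNat = 0 by omega]
      simp
-- the capped scan over a rank-3 segment appends its first (2 - t3) elements
theorem scb_scan_cap3 (zs : List (List (String × String)))
    (h : ∀ c ∈ zs, scbKey c = 3)
    (out : List (List (String × String))) (t2 t3 : Int) (ht : 0 ≤ t3) :
    ∃ u, zs.foldl scbScanStep (out, t2, t3) = (out ++ zs.take (2 - t3).toNat, t2, u) := by
  induction zs generalizing out t3 with
  | nil => exact ⟨t3, by simp⟩
  | cons c rest ih =>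
    have hc := h c (by simp)
    have hrest : ∀ c ∈ rest, scbKey c = 3 := fun c hc => h c (by simp [hc])
    by_cases hlt : t3 < 2
    · simp only [List.foldl_cons, scbScanStep, hc, beq_iff_eq]
      rw [if_neg (show ¬(3:Int) = 2 by omega), if_pos hlt, if_pos trivial]
      obtain ⟨u, hu⟩ := ih hrest (out ++ [c]) (t3 + 1) (by omega)
      refine ⟨u, ?_⟩
      rw [hu, show (2 - t3).toNat = (2 - (t3 + 1)).toNat + 1 by omega, List.take_succ_cons]
      simp
    · simp only [List.foldl_cons, scbScanStep, hc, beq_iff_eq]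
      rw [if_neg (show ¬(3:Int) = 2 by omega), if_neg hlt, if_pos trivial]
      obtain ⟨u, hu⟩ := ih hrest out t3 ht
      refine ⟨u, ?_⟩
      rw [hu, show (2 - t3).toNat = 0 by omega]
      simp

-- A's four filters are the rank filters
theorem scb_filter0 (xs : List (List (String × String))) :
    xs.filter (fun c => scbTimeline c == some "immediate") = scbF 0 xs := by
  apply List.filter_congr; intro c _
  simp [scb_rank?_eq]
theorem scb_filter1 (xs : List (List (String × String))) :
    xs.filter (fun c => scbTimeline c == some "batch") = scbF 1 xs := by
  apply List.filter_congr; intro c _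
  simp [scb_rank?_eq]
theorem scb_filter2 (xs : List (List (String × String))) :
    xs.filter (fun c => scbTimeline c == some "short_term") = scbF 2 xs := by
  apply List.filter_congr; intro c _
  simp [scb_rank?_eq]
theorem scb_filter3 (xs : List (List (String × String))) :
    xs.filter (fun c => [some "medium_term", some "long_term"].contains (scbTimeline c)) = scbF 3 xs := by
  apply List.filter_congr; intro c _
  have h3 : scbRank? c = some 3 ↔ (scbTimeline c = some "medium_term" ∨ scbTimeline c = some "long_term") := by
    simp [scb_rank?_eq]
  simp only [List.contains_cons, List.contains_nil, Bool.or_false]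
  rw [Bool.eq_iff_iff]
  simp [h3]

-- restricting a rank filter to the ranked conflicts changes nothing
theorem scb_filter_ranked (xs : List (List (String × String))) (i : Int) :
    scbF i (xs.filter (fun c => (scbRank? c).isSome)) = scbF i xs := by
  rw [scbF, List.filter_filter]
  apply List.filter_congr; intro c _
  cases h : scbRank? c <;> simp_all

-- members of scbF i have rank i
theorem scb_mem_F (xs : List (List (String × String))) (i : Int) (c : List (String × String))
    (hc : c ∈ scbF i xs) : scbRank? c = some i := by
  simp only [scbF, List.mem_filter, beq_iff_eq] at hc
  exact hc.2

-- ===== VERDICT (by name: the statement is the Claim_ definition above) =====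
theorem select_conflicts_for_batch_py_spec : Claim_equal_select_conflicts_for_batch_py := by
  intro batch_num xs _
  show _ = _
  simp only [select_conflicts_for_batch_py, select_conflicts_for_batch_py_alt]
  rw [PySem.List.sorted_eq_foldl_insertBy]
  rw [show ([] : List (List (String × String))) = [] ++ [] ++ [] ++ [] by simp] at *
  rw [scb_sort_invariant _ (by
      intro c hc
      exact (scb_rank?_isSome c).mp (by simpa using (List.mem_filter.mp hc).2))
    [] [] [] [] (by simp) (by simp) (by simp) (by simp)]
  simp only [List.nil_append, scb_filter_ranked]
  rw [List.foldl_append, List.foldl_append, List.foldl_append]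
  rw [scb_scan_free (scbF 0 xs) (fun c hc => by
      have := scb_key_of_rank c 0 (scb_mem_F xs 0 c hc); simp [this]) [] 0 0]
  rw [scb_scan_free (scbF 1 xs) (fun c hc => by
      have := scb_key_of_rank c 1 (scb_mem_F xs 1 c hc); simp [this]) _ 0 0]
  obtain ⟨u, hu⟩ := scb_scan_cap2 (scbF 2 xs) (fun c hc =>
      scb_key_of_rank c 2 (scb_mem_F xs 2 c hc)) ([] ++ scbF 0 xs ++ scbF 1 xs) 0 0 (by omega)
  rw [hu]
  obtain ⟨v, hv⟩ := scb_scan_cap3 (scbF 3 xs) (fun c hc =>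
      scb_key_of_rank c 3 (scb_mem_F xs 3 c hc)) _ u 0 (by omega)
  rw [hv]
  rw [scb_filter0, scb_filter1, scb_filter2, scb_filter3,
    PySem.List.slice_to _ (by omega), PySem.List.slice_to _ (by omega)]
  simp
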